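-- pv_equiv track=rewrite | github.com/marcosfreitas-tech/tech_desafio_fase5 | tab_modelo_preditivo.py | _feature_name_to_original
-- ===== SOURCE A (Python) =====
-- def _feature_name_to_original(feature_name: str, categorical_cols: list[str]) -> str:
--     if feature_name.startswith("num__"):
--         return feature_name.replace("num__", "", 1)
--     if feature_name.startswith("cat__"):
--         raw = feature_name.replace("cat__", "", 1)
--         for cat_col in sorted(categorical_cols, key=len, reverse=True):
--             prefix = f"{cat_col}_"
--             if raw.startswith(prefix):
--                 return cat_col
--         return raw
--     return feature_name
-- ===== SOURCE B (Python) =====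
-- def _feature_name_to_original(feature_name: str, categorical_cols: list[str]) -> str:
--     if feature_name.startswith("num__"):
--         return feature_name[5:]
--     if feature_name.startswith("cat__"):
--         raw = feature_name[5:]
--         candidates = [c for c in categorical_cols if raw.startswith(c + "_")]
--         if candidates:
--             return max(candidates, key=len)
--         return raw
--     return feature_name
-- ===== Notes on version B (the rewrite author's own statement) =====
-- stated objective: alternative
-- what changed: Replaces A's sort-by-length-descending-then-first-match scan with a single unsorted filter pass over categorical_cols followed by max-by-length, removing the sort entirely.
import Mathlib
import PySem

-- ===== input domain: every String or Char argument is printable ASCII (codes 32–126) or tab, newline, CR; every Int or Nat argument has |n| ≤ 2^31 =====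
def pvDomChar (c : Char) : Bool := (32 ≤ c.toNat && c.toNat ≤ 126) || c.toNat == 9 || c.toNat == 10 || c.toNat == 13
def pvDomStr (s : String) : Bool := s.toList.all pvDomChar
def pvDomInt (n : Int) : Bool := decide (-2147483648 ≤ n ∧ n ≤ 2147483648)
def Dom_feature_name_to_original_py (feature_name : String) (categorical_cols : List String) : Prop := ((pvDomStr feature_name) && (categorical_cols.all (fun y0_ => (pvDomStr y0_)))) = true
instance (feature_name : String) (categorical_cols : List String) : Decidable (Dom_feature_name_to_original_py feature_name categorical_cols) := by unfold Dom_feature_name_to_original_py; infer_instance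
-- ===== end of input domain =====

-- B replaces A's sort-by-length-descending-then-first-match with an unsorted filter pass plus
-- max-by-length (objective: alternative decomposition, no sort).

-- ===== PORT A =====
-- the for-loop: return the first cat_col whose prefix matches, else raw
def pvLoopA (raw : String) : List String → String
  | [] => raw
  | c :: rest => if PySem.Str.startswith raw (c ++ "_") then c else pvLoopA raw rest

def feature_name_to_original_py (feature_name : String) (categorical_cols : List String) : String :=
  if PySem.Str.startswith feature_name "num__" then
    -- feature_name.replace("num__", "", 1): exact here since the guard puts the first occurrence at index 0
    String.ofList (feature_name.toList.drop 5)
  else if PySem.Str.startswith feature_name "cat__" then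
    let raw := String.ofList (feature_name.toList.drop 5)  -- replace("cat__", "", 1), exact under the guard
    pvLoopA raw (PySem.List.sorted categorical_cols (fun c => c.toList.length) true)
  else feature_name

-- ===== PORT B =====
def feature_name_to_original_py_alt (feature_name : String) (categorical_cols : List String) : String :=
  if PySem.Str.startswith feature_name "num__" then
    String.ofList (feature_name.toList.drop 5)
  else if PySem.Str.startswith feature_name "cat__" then
    let raw := String.ofList (feature_name.toList.drop 5)
    let candidates := categorical_cols.filter (fun c => PySem.Str.startswith raw (c ++ "_"))
    match PySem.List.max? candidates (fun c => c.toList.length) with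
    | some m => m
    | none => raw
  else feature_name

-- ===== PRECONDITION & SPEC =====
def Spec_feature_name_to_original_py (feature_name : String) (categorical_cols : List String) (out : String) : Prop := out = feature_name_to_original_py_alt feature_name categorical_cols
instance (feature_name : String) (categorical_cols : List String) (out : String) : Decidable (Spec_feature_name_to_original_py feature_name categorical_cols out) := by unfold Spec_feature_name_to_original_py; infer_instance

-- ===== CLAIM (what is proved, stated in full; the proofs are below) =====
def Claim_equal_feature_name_to_original_py : Prop := ∀ (feature_name : String) (categorical_cols : List String), Dom_feature_name_to_original_py feature_name categorical_cols → Spec_feature_name_to_original_py feature_name categorical_cols (feature_name_to_original_py feature_name categorical_cols)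

-- ===== LEMMAS AND PROOFS =====

-- A's loop is find?-with-default
theorem pvLoopA_eq_find? (raw : String) (l : List String) :
    pvLoopA raw l = ((l.find? (fun c => PySem.Str.startswith raw (c ++ "_"))).getD raw) := by
  induction l with
  | nil => rfl
  | cons c rest ih =>
    by_cases h : PySem.Str.startswith raw (c ++ "_") = true
    · rw [pvLoopA, if_pos h, List.find?_cons_of_pos (p := fun x => PySem.Str.startswith raw (x ++ "_")) h, Option.getD_some]
    · rw [pvLoopA, if_neg h, List.find?_cons_of_neg (p := fun x => PySem.Str.startswith raw (x ++ "_")) h, ih]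

-- the first match in a key-descending list has maximal key among matches
theorem find?_desc_isMax {α κ : Type} [LinearOrder κ] (key : α → κ) (P : α → Bool)
    (s : List α) (hs : s.Pairwise (fun a b => key b ≤ key a)) {m : α}
    (hm : s.find? P = some m) : P m = true ∧ m ∈ s ∧ ∀ y ∈ s, P y = true → key y ≤ key m := by
  induction s with
  | nil => simp at hm
  | cons a t ih =>
    rw [List.pairwise_cons] at hs
    by_cases ha : P a = true
    · rw [List.find?_cons_of_pos ha] at hm
      cases hm
      exact ⟨ha, List.mem_cons_self, by
        intro y hy _
        rcases List.mem_cons.mp hy with h | h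
        · exact le_of_eq (congrArg key h)
        · exact hs.1 y h⟩
    · rw [List.find?_cons_of_neg ha] at hm
      obtain ⟨h1, h2, h3⟩ := ih hs.2 hm
      refine ⟨h1, List.mem_cons_of_mem _ h2, ?_⟩
      intro y hy hP
      rcases List.mem_cons.mp hy with h | h
      · exact absurd (h ▸ hP) ha
      · exact h3 y h hP

-- two cat_cols that both match raw and have equal length are the same string
theorem match_unique (raw m m' : String)
    (hm : PySem.Str.startswith raw (m ++ "_") = true)
    (hm' : PySem.Str.startswith raw (m' ++ "_") = true)
    (hlen : m.toList.length = m'.toList.length) : m = m' := by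
  rw [PySem.Str.startswith_eq, PySem.Chars.startswith_iff] at hm hm'
  simp only [String.toList_append] at hm hm'
  have hl : ((m.toList ++ "_".toList)).length = ((m'.toList ++ "_".toList)).length := by
    simp [hlen]
  have h1 : (m.toList ++ "_".toList) <+: (m'.toList ++ "_".toList) ∨
      (m'.toList ++ "_".toList) <+: (m.toList ++ "_".toList) :=
    List.prefix_or_prefix_of_prefix hm hm'
  have heq : m.toList ++ "_".toList = m'.toList ++ "_".toList := by
    rcases h1 with h | h
    · exact List.IsPrefix.eq_of_length h hl
    · exact (List.IsPrefix.eq_of_length h hl.symm).symm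
  have := (List.append_inj heq hlen).1
  exact String.toList_inj.mp this

-- core: first match in the length-descending sort = max-by-length of the unsorted filter
theorem loopA_eq_alt (raw : String) (cols : List String) :
    pvLoopA raw (PySem.List.sorted cols (fun c => c.toList.length) true) =
      (match PySem.List.max? (cols.filter (fun c => PySem.Str.startswith raw (c ++ "_")))
          (fun c => c.toList.length) with
        | some m => m
        | none => raw) := by
  set P : String → Bool := fun c => PySem.Str.startswith raw (c ++ "_") with hP
  set key : String → ℕ := fun c => c.toList.length with hkey
  set s := PySem.List.sorted cols key true with hsdef
  rw [pvLoopA_eq_find?]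
  cases hfind : s.find? P with
  | none =>
    have hnone : ∀ y ∈ cols, ¬ P y = true := by
      intro y hy
      exact List.find?_eq_none.mp hfind y ((PySem.List.mem_sorted cols key true y).mpr hy)
    have : cols.filter P = [] := List.filter_eq_nil_iff.mpr hnone
    rw [this]
    simp [PySem.List.max?]
  | some m =>
    obtain ⟨h1, h2, h3⟩ := find?_desc_isMax key P s (hsdef ▸ PySem.List.sorted_pairwise_rev cols key) hfind
    have hmcols : m ∈ cols := (PySem.List.mem_sorted cols key true m).mp h2
    have hmfil : m ∈ cols.filter P := List.mem_filter.mpr ⟨hmcols, h1⟩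
    cases hmax : PySem.List.max? (cols.filter P) key with
    | none =>
      rw [PySem.List.max?_eq_none_iff] at hmax
      rw [hmax] at hmfil
      simp at hmfil
    | some m' =>
      have hm'fil := PySem.List.max?_mem hmax
      have hm'P := (List.mem_filter.mp hm'fil).2
      have hm'cols := (List.mem_filter.mp hm'fil).1
      have hle : key m ≤ key m' := PySem.List.max?_isMax hmax m hmfil
      have hge : key m' ≤ key m :=
        h3 m' ((PySem.List.mem_sorted cols key true m').mpr hm'cols) hm'P
      have : m = m' := match_unique raw m m' h1 hm'P (le_antisymm hle hge)
      simp [this]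

-- ===== VERDICT (by name: the statement is the Claim_ definition above) =====
theorem feature_name_to_original_py_spec : Claim_equal_feature_name_to_original_py := by
  intro feature_name categorical_cols _
  unfold Spec_feature_name_to_original_py feature_name_to_original_py feature_name_to_original_py_alt
  by_cases h1 : PySem.Str.startswith feature_name "num__" = true
  · rw [if_pos h1, if_pos h1]
  · rw [if_neg h1, if_neg h1]
    by_cases h2 : PySem.Str.startswith feature_name "cat__" = true
    · rw [if_pos h2, if_pos h2]
      exact loopA_eq_alt _ _
    · rw [if_neg h2, if_neg h2]
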